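-- pv_equiv track=rewrite | github.com/egorka-angelskiy/EPA | functions.py | iter_string
-- ===== SOURCE A (Python) =====
-- def iter_string(form):
--     string = ''
--     counter = 0
--     for i in form:
--         counter += 1
--         if counter == len(form):
--             string += f"{i.lower()}='{form.get(i)}' "
--         else:
--             string += f"{i.lower()}='{form.get(i)}', "
--     return string
-- ===== SOURCE B (Python) =====
-- def iter_string(form):
--     if not form:
--         return ''
--     parts = [f"{k.lower()}='{v}'" for k, v in form.items()]
--     return ', '.join(parts) + ' '
-- ===== Notes on version B (the rewrite author's own statement) =====
-- stated objective: idiomatic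
-- what changed: Replaces the counter-and-last-element branch plus repeated form.get(key) lookups with a list of pre-formatted 'k=v' parts taken from items() and a single ', '.join plus trailing space, with an explicit empty-dict case. Pre_ excludes association lists with duplicate keys, which a Python dict cannot represent, so A's first-match lookup there is an artefact of the list encoding.
import Mathlib
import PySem

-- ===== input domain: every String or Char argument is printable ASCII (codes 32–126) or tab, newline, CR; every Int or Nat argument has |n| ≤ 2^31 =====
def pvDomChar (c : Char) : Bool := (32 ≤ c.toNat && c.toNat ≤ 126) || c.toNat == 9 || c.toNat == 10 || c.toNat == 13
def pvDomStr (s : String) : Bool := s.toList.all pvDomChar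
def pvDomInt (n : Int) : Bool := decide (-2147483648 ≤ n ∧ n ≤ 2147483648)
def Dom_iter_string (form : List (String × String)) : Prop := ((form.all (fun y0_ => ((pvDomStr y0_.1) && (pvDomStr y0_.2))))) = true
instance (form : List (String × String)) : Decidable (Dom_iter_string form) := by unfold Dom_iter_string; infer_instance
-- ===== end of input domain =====

-- B builds the formatted parts first and joins them; one honest line: same output, join instead of a counter with a last-element branch.

-- ===== PORT A =====
-- counter loop; last element appends "…' " instead of "…', "; form.get(i) is a first-match dict lookup
def iter_string (form : List (String × String)) : String :=
  (form.foldl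
    (fun (st : String × Int) (i : String × String) =>
      let counter := st.2 + 1
      if counter = (form.length : Int) then
        (st.1 ++ (PySem.Str.lower i.1 ++ "='" ++ (PySem.Dict.mk form).getD i.1 "" ++ "' "), counter)
      else
        (st.1 ++ (PySem.Str.lower i.1 ++ "='" ++ (PySem.Dict.mk form).getD i.1 "" ++ "', "), counter))
    ("", 0)).1

-- ===== PORT B =====
-- empty dict → ''; otherwise format each item, join with ', ', add the trailing space
def iter_string_alt (form : List (String × String)) : String :=
  if form.isEmpty then ""
  else PySem.Str.join ", " (form.map (fun p => PySem.Str.lower p.1 ++ "='" ++ p.2 ++ "'")) ++ " "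

-- ===== PRECONDITION & SPEC =====
-- Pre_ excludes association lists with duplicate keys: a Python dict cannot represent them, and on
-- them A's repeated first-match lookup is an artefact of the list encoding.
def Pre_iter_string (form : List (String × String)) : Prop := (form.map Prod.fst).Nodup
instance (form : List (String × String)) : Decidable (Pre_iter_string form) := by unfold Pre_iter_string; infer_instance
def pvWitness_iter_string : (List (String × String)) := [("A", "1"), ("b x", "2")]
def Spec_iter_string (form : List (String × String)) (out : String) : Prop := out = iter_string_alt form
instance (form : List (String × String)) (out : String) : Decidable (Spec_iter_string form out) := by unfold Spec_iter_string; infer_instance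

-- ===== CLAIM (what is proved, stated in full; the proofs are below) =====
def Claim_equal_iter_string : Prop := ∀ (form : List (String × String)), Dom_iter_string form → Pre_iter_string form → Spec_iter_string form (iter_string form)

-- ===== LEMMAS AND PROOFS =====

-- the formatted piece for one item
def pvItem (p : String × String) : String := PySem.Str.lower p.1 ++ "='" ++ p.2 ++ "'"

-- what A's loop appends for the remaining suffix t (last element gets ' ', others ', ')
def pvRender : List (String × String) → String
  | [] => ""
  | [p] => pvItem p ++ " "
  | p :: q :: r => pvItem p ++ ", " ++ pvRender (q :: r)

lemma pvLookup (form : List (String × String)) (hnd : (form.map Prod.fst).Nodup)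
    (p : String × String) (hp : p ∈ form) :
    (PySem.Dict.mk form).getD p.1 "" = p.2 := by
  exact PySem.Dict.getD_of_mem_items (d := PySem.Dict.mk form) hp hnd ""

lemma pvLoopA (form : List (String × String)) (t : List (String × String)) (s : String) (c : Int)
    (hc : c + t.length = form.length)
    (hv : ∀ p ∈ t, (PySem.Dict.mk form).getD p.1 "" = p.2) :
    (t.foldl
      (fun (st : String × Int) (i : String × String) =>
        let counter := st.2 + 1
        if counter = (form.length : Int) then
          (st.1 ++ (PySem.Str.lower i.1 ++ "='" ++ (PySem.Dict.mk form).getD i.1 "" ++ "' "), counter)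
        else
          (st.1 ++ (PySem.Str.lower i.1 ++ "='" ++ (PySem.Dict.mk form).getD i.1 "" ++ "', "), counter))
      (s, c)).1 = s ++ pvRender t := by
  induction t generalizing s c with
  | nil => simp [pvRender]
  | cons p t ih =>
    cases t with
    | nil =>
      have h1 : c + 1 = (form.length : Int) := by
        simpa using hc
      simp [List.foldl, h1, pvRender, pvItem, hv p (by simp), String.append_assoc]
    | cons q r =>
      have h1 : c + 1 ≠ (form.length : Int) := by
        intro h
        simp only [List.length_cons] at hc
        push_cast at hc
        omega
      have hc' : (c + 1) + ((q :: r).length : Int) = form.length := by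
        have := hc
        simp only [List.length_cons] at this ⊢
        push_cast at this ⊢
        omega
      have := ih (s ++ (PySem.Str.lower p.1 ++ "='" ++ (PySem.Dict.mk form).getD p.1 "" ++ "', ")) (c + 1) hc'
        (fun x hx => hv x (by simp [hx]))
      have hstep : (List.foldl
          (fun (st : String × Int) (i : String × String) =>
            let counter := st.2 + 1
            if counter = (form.length : Int) then
              (st.1 ++ (PySem.Str.lower i.1 ++ "='" ++ (PySem.Dict.mk form).getD i.1 "" ++ "' "), counter)
            else
              (st.1 ++ (PySem.Str.lower i.1 ++ "='" ++ (PySem.Dict.mk form).getD i.1 "" ++ "', "), counter))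
          (s, c) (p :: q :: r))
          = (List.foldl
          (fun (st : String × Int) (i : String × String) =>
            let counter := st.2 + 1
            if counter = (form.length : Int) then
              (st.1 ++ (PySem.Str.lower i.1 ++ "='" ++ (PySem.Dict.mk form).getD i.1 "" ++ "' "), counter)
            else
              (st.1 ++ (PySem.Str.lower i.1 ++ "='" ++ (PySem.Dict.mk form).getD i.1 "" ++ "', "), counter))
          (s ++ (PySem.Str.lower p.1 ++ "='" ++ (PySem.Dict.mk form).getD p.1 "" ++ "', "), c + 1) (q :: r)) := by
        rw [List.foldl_cons]
        simp only [if_neg h1]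
      rw [hstep, this, hv p (by simp), pvRender, pvItem]
      simp [String.append_assoc]

lemma pvRender_eq_join (t : List (String × String)) (ht : t ≠ []) :
    pvRender t = PySem.Str.join ", " (t.map pvItem) ++ " " := by
  induction t with
  | nil => simp at ht
  | cons p t ih =>
    cases t with
    | nil => simp [pvRender, PySem.Str.join]
    | cons q r =>
      rw [pvRender, ih (by simp)]
      apply String.toList_inj.mp
      simp only [PySem.Str.join, String.toList_append, String.toList_ofList,
        List.map_cons, PySem.Chars.join_cons_cons]
      simp [List.append_assoc]

-- ===== VERDICT (by name: the statement is the Claim_ definition above) =====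
theorem iter_string_spec : Claim_equal_iter_string := by
  intro form _ hpre
  unfold Spec_iter_string iter_string iter_string_alt
  cases form with
  | nil => simp
  | cons p t =>
    rw [pvLoopA (p :: t) (p :: t) "" 0 (by simp) (fun x hx => pvLookup _ hpre x hx)]
    rw [pvRender_eq_join _ (by simp)]
    have : ("" : String) ++ (PySem.Str.join ", " (List.map pvItem (p :: t)) ++ " ")
        = PySem.Str.join ", " (List.map pvItem (p :: t)) ++ " " := by simp
    rw [this]
    rfl
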